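-- pv_equiv track=rewrite | github.com/surajit4444mondal/spatially_constrained_GS_fit | make_param_maps_python_cython_combination.py | get_points_to_remove
-- ===== SOURCE A (Python) =====
-- def get_points_to_remove(cluster_list):
--
-- 	member_num=[]
-- 	for cluster in cluster_list:
-- 		member_num.append(len(cluster))
--
-- 	min_member=min(member_num)
-- 	max_member=4
--
-- 	points_to_remove=[]
-- 	max_points_to_remove=10
-- 	j=0
--
-- 	for current_member_number in range(min_member,max_member+1):
-- 		for n,cluster in enumerate(cluster_list):
-- 			if member_num[n]==current_member_number:
-- 				if j+member_num[n]>max_points_to_remove: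
-- 					continue
-- 				for member in cluster:
-- 					points_to_remove.append(member)
-- 					j+=1
-- 	return points_to_remove
-- ===== SOURCE B (Python) =====
-- def get_points_to_remove(cluster_list):
--     min_member = min(len(c) for c in cluster_list)
--     buckets = {}
--     for c in cluster_list:
--         k = len(c)
--         buckets[k] = buckets.get(k, []) + [c]
--     points_to_remove = []
--     j = 0
--     for size in range(min_member, 5):
--         for cluster in buckets.get(size, []):
--             if j + size <= 10:
--                 points_to_remove.extend(cluster)
--                 j += size
--     return points_to_remove
-- ===== Notes on version B (the rewrite author's own statement) =====
-- stated objective: simpler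
-- what changed: B builds a size->clusters bucket index in one pass and then walks sizes min..4 over the buckets, instead of A rescanning the whole cluster list (with an index lookup into a separate length list) once per size.
import Mathlib
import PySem

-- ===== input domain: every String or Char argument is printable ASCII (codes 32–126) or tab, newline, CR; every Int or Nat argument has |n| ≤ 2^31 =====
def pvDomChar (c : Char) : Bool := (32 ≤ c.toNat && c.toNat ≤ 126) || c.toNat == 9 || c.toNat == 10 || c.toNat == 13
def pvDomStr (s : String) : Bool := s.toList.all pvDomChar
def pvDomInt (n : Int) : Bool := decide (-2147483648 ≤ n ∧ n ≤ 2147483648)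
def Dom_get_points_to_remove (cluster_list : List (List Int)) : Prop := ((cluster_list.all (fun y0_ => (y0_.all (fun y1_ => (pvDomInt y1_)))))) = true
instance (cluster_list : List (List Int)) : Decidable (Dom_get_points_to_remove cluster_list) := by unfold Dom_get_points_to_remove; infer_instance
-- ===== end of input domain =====

-- B replaces A's per-size rescans of the whole cluster list with one bucket-index pass (size -> clusters), then a single ordered walk: simpler traversal, same result.


-- ===== PORT A =====
def get_points_to_remove (cluster_list : List (List Int)) : List Int :=
  let member_num : List Int := cluster_list.foldl (fun a c => a ++ [PySem.List.len c]) []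
  match PySem.List.min? member_num (fun x => x) with
  | none => []   -- min([]) raises ValueError; excluded by Pre_
  | some min_member =>
    let max_member : Int := 4
    let res : List Int × Int :=
      (PySem.List.pyRange min_member (max_member + 1) 1).foldl (fun st cur =>
        (PySem.List.enumerate cluster_list).foldl (fun (st : List Int × Int) nc =>
          if PySem.List.pyGetD member_num nc.1 0 == cur then
            if decide (st.2 + PySem.List.pyGetD member_num nc.1 0 > 10) then st
            else nc.2.foldl (fun (st : List Int × Int) member => (st.1 ++ [member], st.2 + 1)) st
          else st) st) ([], 0)
    res.1

-- ===== PORT B =====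
def get_points_to_remove_alt (cluster_list : List (List Int)) : List Int :=
  match PySem.List.min? (cluster_list.map (fun c => PySem.List.len c)) (fun x => x) with
  | none => []   -- min of an empty generator raises ValueError; excluded by Pre_
  | some min_member =>
    let buckets : PySem.Dict Int (List (List Int)) :=
      cluster_list.foldl (fun d c =>
        PySem.Dict.insert d (PySem.List.len c) (PySem.Dict.getD d (PySem.List.len c) [] ++ [c]))
        PySem.Dict.empty
    let res : List Int × Int :=
      (PySem.List.pyRange min_member 5 1).foldl (fun st size =>
        (PySem.Dict.getD buckets size []).foldl (fun (st : List Int × Int) cluster =>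
          if decide (st.2 + size ≤ 10) then (st.1 ++ cluster, st.2 + size) else st) st) ([], 0)
    res.1

-- ===== PRECONDITION & SPEC =====
-- Python A raises ValueError (min of an empty sequence) on the empty list; B raises there too.
def Pre_get_points_to_remove (cluster_list : List (List Int)) : Prop := cluster_list ≠ []
instance (cluster_list : List (List Int)) : Decidable (Pre_get_points_to_remove cluster_list) := by unfold Pre_get_points_to_remove; infer_instance
def pvWitness_get_points_to_remove : List (List Int) := [[1, 2], [3]]

def Spec_get_points_to_remove (cluster_list : List (List Int)) (out : List Int) : Prop := out = get_points_to_remove_alt cluster_list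
instance (cluster_list : List (List Int)) (out : List Int) : Decidable (Spec_get_points_to_remove cluster_list out) := by unfold Spec_get_points_to_remove; infer_instance

-- ===== CLAIM (what is proved, stated in full; the proofs are below) =====
def Claim_equal_get_points_to_remove : Prop := ∀ (cluster_list : List (List Int)), Dom_get_points_to_remove cluster_list → Pre_get_points_to_remove cluster_list → Spec_get_points_to_remove cluster_list (get_points_to_remove cluster_list)

-- ===== LEMMAS AND PROOFS =====

-- the buckets Dict indexes cluster_list by length: lookup at s is the ordered filter
theorem pv_bucket_getD (l : List (List Int)) (d : PySem.Dict Int (List (List Int))) (s : Int) :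
    (l.foldl (fun d c =>
        PySem.Dict.insert d (PySem.List.len c) (PySem.Dict.getD d (PySem.List.len c) [] ++ [c])) d).getD s []
      = d.getD s [] ++ l.filter (fun c => PySem.List.len c == s) := by
  induction l generalizing d with
  | nil => simp
  | cons c l ih =>
    rw [List.foldl_cons, ih, List.filter_cons, PySem.Dict.getD_insert]
    by_cases h : s = PySem.List.len c
    · simp [h, List.append_assoc]
    · have h2 : ¬ (s = (c.length : Int)) := by simpa using h
      have h3 : (((c.length : Int)) == s) = false := by
        simp only [beq_eq_false_iff_ne, ne_eq]
        exact fun e => h2 e.symm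
      simp [h2, h3]

-- a fold over an enumerate whose body only uses the element equals the fold over the list
theorem pv_foldl_enumerate {α β : Type} (g : β → α → β) (l : List α) (s : Int) (init : β) :
    (PySem.List.enumerate l s).foldl (fun st p => g st p.2) init = l.foldl g init := by
  induction l generalizing s init with
  | nil => simp [PySem.List.enumerate_nil]
  | cons x l ih => simp [PySem.List.enumerate_cons, ih]

-- appending a cluster element by element while counting
theorem pv_inner_fold (c : List Int) (st : List Int × Int) :
    c.foldl (fun (st : List Int × Int) m => (st.1 ++ [m], st.2 + 1)) st
      = (st.1 ++ c, st.2 + (c.length : Int)) := by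
  induction c generalizing st with
  | nil => simp
  | cons m c ih => simp [ih]; ring

-- A's scan over enumerate for a fixed size equals the fold over the filtered clusters
theorem pv_A_inner (cluster_list : List (List Int)) (cur : Int) (st : List Int × Int) :
    (PySem.List.enumerate cluster_list).foldl (fun (st : List Int × Int) nc =>
        if PySem.List.pyGetD (cluster_list.map (fun c => PySem.List.len c)) nc.1 0 == cur then
          if decide (st.2 + PySem.List.pyGetD (cluster_list.map (fun c => PySem.List.len c)) nc.1 0 > 10) then st
          else nc.2.foldl (fun (st : List Int × Int) member => (st.1 ++ [member], st.2 + 1)) st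
        else st) st
      = (cluster_list.filter (fun c => PySem.List.len c == cur)).foldl
          (fun (st : List Int × Int) c =>
            if decide (st.2 + cur ≤ 10) then (st.1 ++ c, st.2 + (c.length : Int)) else st) st := by
  have hidx : ∀ p ∈ PySem.List.enumerate cluster_list 0,
      PySem.List.pyGetD (cluster_list.map (fun c => PySem.List.len c)) p.1 0 = PySem.List.len p.2 := by
    intro p hp
    rcases (PySem.List.mem_enumerate_iff cluster_list 0 p).1 hp with ⟨k, hk, hp2⟩
    subst hp2
    simp only [zero_add, PySem.List.pyGetD_natCast]
    simp [List.getD_eq_getElem?_getD, hk]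
  rw [PySem.List.foldl_congr_mem (g := fun (st : List Int × Int) (nc : Int × List Int) =>
      if PySem.List.len nc.2 == cur then
        if decide (st.2 + PySem.List.len nc.2 > 10) then st
        else nc.2.foldl (fun (st : List Int × Int) member => (st.1 ++ [member], st.2 + 1)) st
      else st)]
  · rw [pv_foldl_enumerate (g := fun (st : List Int × Int) (c : List Int) =>
      if PySem.List.len c == cur then
        if decide (st.2 + PySem.List.len c > 10) then st
        else c.foldl (fun (st : List Int × Int) member => (st.1 ++ [member], st.2 + 1)) st
      else st)]
    rw [PySem.List.foldl_if_eq_foldl_filter]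
    apply PySem.List.foldl_congr_mem
    intro acc c hc
    have hlen : PySem.List.len c = cur := by
      have := List.of_mem_filter hc; simpa using this
    have hcl : (c.length : Int) = cur := by simpa using hlen
    simp only [pv_inner_fold, decide_eq_true_eq]
    split_ifs with h1 h2 h2 <;>
      first
        | rfl
        | (exfalso; omega)
  · intro acc p hp
    rw [hidx p hp]

-- ===== VERDICT (by name: the statement is the Claim_ definition above) =====
theorem get_points_to_remove_spec : Claim_equal_get_points_to_remove := by
  intro cluster_list _ hpre
  unfold Spec_get_points_to_remove get_points_to_remove get_points_to_remove_alt
  have hmn : cluster_list.foldl (fun a c => a ++ [PySem.List.len c]) []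
      = cluster_list.map (fun c => PySem.List.len c) := by
    simpa using PySem.List.foldl_append_singleton_eq_map (f := fun c => PySem.List.len c)
      (l := cluster_list) (acc := [])
  simp only [hmn]
  cases hmin : PySem.List.min? (cluster_list.map (fun c => PySem.List.len c)) (fun x => x) with
  | none => rfl
  | some min_member =>
    dsimp only
    congr 1
    apply PySem.List.foldl_congr_mem
    intro st cur _
    rw [pv_A_inner, pv_bucket_getD]
    simp only [PySem.Dict.getD_empty, List.nil_append]
    apply PySem.List.foldl_congr_mem
    intro acc c hc
    have hlen : PySem.List.len c = cur := by
      have := List.of_mem_filter hc; simpa using this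
    have : (c.length : Int) = cur := by simpa [PySem.List.len] using hlen
    rw [this]
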